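-- pv_equiv track=rewrite | github.com/karthikpappu/pyc_source | pycfiles/plonetheme.labs-1.1b1.tar/searchview.py | orderTypesList
-- ===== SOURCE A (Python) =====
-- def orderTypesList(list):
--     order = [
--      'All', 'News Item', 'Event', 'Media', 'Organization', 'Person', 'Work']
--     result = []
--     for type in order:
--         if type in list:
--             result.append(type)
--
--     for extra in list:
--         if extra not in result:
--             result.append(extra)
--
--     return result
-- ===== SOURCE B (Python) =====
-- def orderTypesList(list):
--     order = [
--      'All', 'News Item', 'Event', 'Media', 'Organization', 'Person', 'Work']
--     priority = set(order)
--     present = set()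
--     extras = []
--     seen = set()
--     for x in list:
--         if x in priority:
--             present.add(x)
--         elif x not in seen:
--             seen.add(x)
--             extras.append(x)
--     return [t for t in order if t in present] + extras
-- ===== Notes on version B (the rewrite author's own statement) =====
-- stated objective: faster
-- what changed: One pass over the input classifying each element into a present-set of priority names or a first-occurrence extras list via hash sets, then a filter of the constant order list, replacing A's membership scan of the input per priority name and its scan of the growing result per input element.
import Mathlib
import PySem

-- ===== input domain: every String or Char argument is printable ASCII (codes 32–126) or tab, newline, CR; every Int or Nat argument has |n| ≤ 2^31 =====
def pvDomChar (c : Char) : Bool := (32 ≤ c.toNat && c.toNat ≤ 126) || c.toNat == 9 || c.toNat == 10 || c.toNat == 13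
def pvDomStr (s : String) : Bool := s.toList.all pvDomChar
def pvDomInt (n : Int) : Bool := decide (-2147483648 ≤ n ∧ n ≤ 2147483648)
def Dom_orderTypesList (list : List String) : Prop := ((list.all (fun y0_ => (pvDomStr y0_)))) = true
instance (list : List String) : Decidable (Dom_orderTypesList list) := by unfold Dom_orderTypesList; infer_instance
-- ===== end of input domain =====

-- B replaces A's quadratic membership scans by one set-classifying pass plus a filter of the fixed order list.

-- ===== PORT A =====
def pvOrder : List String := ["All", "News Item", "Event", "Media", "Organization", "Person", "Work"]

def orderTypesList (list : List String) : List String :=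
  let result := pvOrder.foldl (fun result type => if list.contains type then result ++ [type] else result) []
  list.foldl (fun result extra => if result.contains extra then result else result ++ [extra]) result

-- ===== PORT B =====
-- one step of B's single loop: state = (present, extras, seen)
def pvAltStep (priority : PySem.Set String) (st : PySem.Set String × List String × PySem.Set String)
    (x : String) : PySem.Set String × List String × PySem.Set String :=
  if priority.contains x then (st.1.add x, st.2.1, st.2.2)
  else if st.2.2.contains x then st
  else (st.1, st.2.1 ++ [x], st.2.2.add x)

def orderTypesList_alt (list : List String) : List String :=
  let priority := PySem.Set.ofList pvOrder
  let st := list.foldl (pvAltStep priority) (PySem.Set.empty, [], PySem.Set.empty)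
  pvOrder.filter (fun t => st.1.contains t) ++ st.2.1

-- ===== PRECONDITION & SPEC =====
def Spec_orderTypesList (list : List String) (out : List String) : Prop := out = orderTypesList_alt list
instance (list : List String) (out : List String) : Decidable (Spec_orderTypesList list out) := by unfold Spec_orderTypesList; infer_instance

-- ===== CLAIM (what is proved, stated in full; the proofs are below) =====
def Claim_equal_orderTypesList : Prop := ∀ (list : List String), Dom_orderTypesList list → Spec_orderTypesList list (orderTypesList list)

-- ===== LEMMAS AND PROOFS =====

-- membership in B's present-set after the loop
lemma pvAlt_present_mem (P : PySem.Set String) :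
    ∀ (l : List String) (p : PySem.Set String) (e : List String) (s : PySem.Set String) (t : String),
      t ∈ (l.foldl (pvAltStep P) (p, e, s)).1 ↔ t ∈ p ∨ (t ∈ l ∧ t ∈ P) := by
  intro l
  induction l with
  | nil => simp
  | cons x l ih =>
    intro p e s t
    simp only [List.foldl_cons, pvAltStep]
    by_cases hx : x ∈ P
    · rw [if_pos (show PySem.Set.contains P x = true by simp; exact hx)]
      rw [ih]
      simp only [PySem.Set.mem_add, List.mem_cons]
      aesop
    · rw [if_neg (show ¬ PySem.Set.contains P x = true by simp; exact hx)]
      by_cases hs : PySem.Set.contains s x = true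
      · rw [if_pos hs, ih]
        simp only [List.mem_cons]
        aesop
      · rw [if_neg hs, ih]
        simp only [List.mem_cons]
        aesop

-- A's second loop from base ++ extras matches B's extras component
lemma pvAlt_extras (base : List String) :
    ∀ (l : List String) (extras : List String) (seen p : PySem.Set String),
      (∀ x, x ∈ seen ↔ x ∈ extras) →
      (∀ x ∈ l, (x ∈ base ↔ x ∈ pvOrder)) →
      l.foldl (fun result extra => if result.contains extra then result else result ++ [extra]) (base ++ extras)
        = base ++ (l.foldl (pvAltStep (PySem.Set.ofList pvOrder)) (p, extras, seen)).2.1 := by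
  intro l
  induction l with
  | nil => intro extras seen p _ _; simp
  | cons x l ih =>
    intro extras seen p hseen hbase
    have hbx := hbase x (by simp)
    have hbase' : ∀ y ∈ l, (y ∈ base ↔ y ∈ pvOrder) := fun y hy => hbase y (by simp [hy])
    simp only [List.foldl_cons, pvAltStep]
    by_cases hx : x ∈ pvOrder
    · rw [if_pos (show PySem.Set.contains (PySem.Set.ofList pvOrder) x = true by
        simp [PySem.Set.mem_ofList]; exact hx)]
      rw [if_pos (show (base ++ extras).contains x = true by
        simp [List.mem_append]; exact Or.inl (hbx.mpr hx))]
      exact ih extras seen _ hseen hbase'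
    · rw [if_neg (show ¬ PySem.Set.contains (PySem.Set.ofList pvOrder) x = true by
        simp [PySem.Set.mem_ofList]; exact hx)]
      by_cases he : x ∈ extras
      · rw [if_pos (show PySem.Set.contains seen x = true by
          simp [hseen x]; exact he)]
        rw [if_pos (show (base ++ extras).contains x = true by
          simp [List.mem_append]; exact Or.inr he)]
        exact ih extras seen _ hseen hbase'
      · rw [if_neg (show ¬ PySem.Set.contains seen x = true by
          simp [hseen x]; exact he)]
        rw [if_neg (show ¬ (base ++ extras).contains x = true by
          simp [List.mem_append, not_or]; exact ⟨fun h => hx (hbx.mp h), he⟩)]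
        rw [List.append_assoc]
        refine ih (extras ++ [x]) _ _ ?_ hbase'
        intro y
        simp [PySem.Set.mem_add, hseen y, List.mem_append]

-- ===== VERDICT (by name: the statement is the Claim_ definition above) =====
theorem orderTypesList_spec : Claim_equal_orderTypesList := by
  intro list _
  unfold Spec_orderTypesList orderTypesList orderTypesList_alt
  rw [PySem.List.foldl_append_if_eq_filter]
  simp only [List.nil_append]
  have hfilter : pvOrder.filter (fun t => list.contains t)
      = pvOrder.filter (fun t =>
          (list.foldl (pvAltStep (PySem.Set.ofList pvOrder)) ([], [], [])).1.contains t) := by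
    apply List.filter_congr
    intro t ht
    have hmem := pvAlt_present_mem (PySem.Set.ofList pvOrder) list [] [] [] t
    simp [hmem, PySem.Set.mem_ofList, ht]
  have hmain := pvAlt_extras (pvOrder.filter (fun t => list.contains t)) list [] [] []
      (fun x => Iff.rfl)
      (by intro x hx; simp [List.mem_filter, hx])
  rw [List.append_nil] at hmain
  rw [hmain, hfilter]
  rfl
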